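-- pv_equiv track=rewrite | github.com/Roshan6422/report | ai_engine_manager.py | _is_ai_refusal
-- ===== SOURCE A (Python) =====
-- def _is_ai_refusal(text: str) -> bool:
--     """Detects if the AI returned a refusal (e.g. safety filters)."""
--     if not text:
--         return False
--     refusal_keywords = [
--         "i am sorry",
--         "i cannot",
--         "i'm sorry",
--         "as an ai",
--         "policy",
--         "unable to",
--         "don't have the ability",
--         "does not permit",
--         "restricted",
--         "sensitive content",
--         "violence",
--         "graphic",
--     ]
--     low = (text.decode("utf-8") if isinstance(text, bytes) else str(text)).lower()
--     return any(kw in low for kw in refusal_keywords)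
-- ===== SOURCE B (Python) =====
-- _REFUSAL_KEYWORDS = (
--     "i am sorry",
--     "i cannot",
--     "i'm sorry",
--     "as an ai",
--     "policy",
--     "unable to",
--     "don't have the ability",
--     "does not permit",
--     "restricted",
--     "sensitive content",
--     "violence",
--     "graphic",
-- )
--
--
-- def _is_ai_refusal(text: str) -> bool:
--     """Detects if the AI returned a refusal (e.g. safety filters)."""
--     if not text:
--         return False
--     low = (text.decode("utf-8") if isinstance(text, bytes) else str(text)).lower()
--     # Single left-to-right sweep over the text: at each position, test whether
--     # any keyword starts there (instead of twelve separate substring searches).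
--     for i in range(len(low)):
--         for kw in _REFUSAL_KEYWORDS:
--             if low.startswith(kw, i):
--                 return True
--     return False
-- ===== Notes on version B (the rewrite author's own statement) =====
-- stated objective: alternative
-- what changed: Replaced the keyword-driven loop of twelve independent whole-text substring searches by a single left-to-right sweep over the lowered text that tests at each position whether any keyword starts there.
import Mathlib
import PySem

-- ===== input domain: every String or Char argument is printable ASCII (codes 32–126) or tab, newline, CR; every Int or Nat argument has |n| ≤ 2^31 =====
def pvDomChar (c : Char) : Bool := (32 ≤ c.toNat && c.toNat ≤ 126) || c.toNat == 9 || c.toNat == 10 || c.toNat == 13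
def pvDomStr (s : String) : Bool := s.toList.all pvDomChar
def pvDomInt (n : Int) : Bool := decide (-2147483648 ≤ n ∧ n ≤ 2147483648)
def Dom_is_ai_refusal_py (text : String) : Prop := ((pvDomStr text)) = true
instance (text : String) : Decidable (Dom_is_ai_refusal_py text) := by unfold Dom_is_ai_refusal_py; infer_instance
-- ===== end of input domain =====

-- B replaces twelve independent substring searches by one left-to-right sweep testing each position; objective: alternative.


-- ===== PORT A =====
def pvRefusalKeywords : List String :=
  ["i am sorry", "i cannot", "i'm sorry", "as an ai", "policy", "unable to",
   "don't have the ability", "does not permit", "restricted", "sensitive content",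
   "violence", "graphic"]

def is_ai_refusal_py (text : String) : Bool :=
  if text.toList.isEmpty then false
  else
    let low := PySem.Str.lower text
    pvRefusalKeywords.any (fun kw => PySem.Str.isIn kw low)

-- ===== PORT B =====
-- the same keywords, as character lists (B works on the lowered text character by character)
def pvRefusalKeywordsChars : List (List Char) := pvRefusalKeywords.map String.toList

-- one sweep: at each position (i.e. each suffix) test whether some keyword starts there
def pvSweep (s : List Char) : Bool :=
  match s with
  | [] => false
  | _ :: t =>
    if pvRefusalKeywordsChars.any (fun kw => PySem.Chars.startswith s kw) then true
    else pvSweep t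

def is_ai_refusal_py_alt (text : String) : Bool :=
  if text.toList.isEmpty then false
  else pvSweep (PySem.Chars.lower text.toList)

-- ===== PRECONDITION & SPEC =====
def Spec_is_ai_refusal_py (text : String) (out : Bool) : Prop := out = is_ai_refusal_py_alt text
instance (text : String) (out : Bool) : Decidable (Spec_is_ai_refusal_py text out) := by unfold Spec_is_ai_refusal_py; infer_instance

-- ===== CLAIM (what is proved, stated in full; the proofs are below) =====
def Claim_equal_is_ai_refusal_py : Prop := ∀ (text : String), Dom_is_ai_refusal_py text → Spec_is_ai_refusal_py text (is_ai_refusal_py text)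

-- ===== LEMMAS AND PROOFS =====
lemma pvSweep_eq_any (s : List Char) :
    pvSweep s = pvRefusalKeywordsChars.any (fun kw => PySem.Chars.isIn kw s) := by
  induction s with
  | nil =>
    have : pvRefusalKeywordsChars.any (fun kw => PySem.Chars.isIn kw ([] : List Char)) = false := by
      decide
    simp [pvSweep, this]
  | cons c t ih =>
    rw [Bool.eq_iff_iff]
    simp only [pvSweep]
    split_ifs with h
    · simp only [true_iff, List.any_eq_true] at h ⊢
      obtain ⟨kw, hkw, hpre⟩ := h
      rw [PySem.Chars.startswith_iff _ _] at hpre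
      exact ⟨kw, hkw, (PySem.Chars.isIn_iff_infix _ _).mpr hpre.isInfix⟩
    · rw [ih]
      simp only [List.any_eq_true] at h ⊢
      constructor
      · rintro ⟨kw, hkw, hin⟩
        refine ⟨kw, hkw, (PySem.Chars.isIn_iff_infix _ _).mpr ?_⟩
        exact ((PySem.Chars.isIn_iff_infix _ _).mp hin).trans (List.suffix_cons c t).isInfix
      · rintro ⟨kw, hkw, hin⟩
        rcases List.infix_cons_iff.mp ((PySem.Chars.isIn_iff_infix _ _).mp hin) with hp | hs
        · exact absurd ⟨kw, hkw, (PySem.Chars.startswith_iff _ _).mpr hp⟩ h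
        · exact ⟨kw, hkw, (PySem.Chars.isIn_iff_infix _ _).mpr hs⟩

-- ===== VERDICT (by name: the statement is the Claim_ definition above) =====
theorem is_ai_refusal_py_spec : Claim_equal_is_ai_refusal_py := by
  intro text _
  unfold Spec_is_ai_refusal_py is_ai_refusal_py is_ai_refusal_py_alt
  split_ifs with h
  · rfl
  · rw [pvSweep_eq_any]
    simp [pvRefusalKeywordsChars, List.any_map, Function.comp_def]
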